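-- pv_equiv track=rewrite | github.com/ilya776/TG_BOT_TRADING | backend/app/utils/helpers.py | parse_trading_pair
-- ===== SOURCE A (Python) =====
-- def parse_trading_pair(symbol: str) -> tuple[str, str]:
--     """
--     Parse a trading pair symbol into base and quote currencies.
--
--     Args:
--         symbol: Trading pair symbol (e.g., "BTCUSDT", "BTC/USDT", "BTC-USDT")
--
--     Returns:
--         Tuple of (base, quote) currencies
--     """
--     # Remove separators
--     symbol = symbol.upper().replace("/", "").replace("-", "").replace("_", "")
--
--     # Common quote currencies
--     quotes = ["USDT", "BUSD", "USDC", "TUSD", "BTC", "ETH", "BNB"]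
--
--     for quote in quotes:
--         if symbol.endswith(quote):
--             base = symbol[: -len(quote)]
--             return (base, quote)
--
--     # If no known quote found, assume last 4 chars are quote
--     return (symbol[:-4], symbol[-4:])
-- ===== SOURCE B (Python) =====
-- def _build_trie(quotes):
--     # Trie over the REVERSED quote strings, encoded as parallel arrays:
--     # children[i] maps a char to a child node id, accept[i] marks end of a quote.
--     children = [{}]
--     accept = [False]
--     for q in quotes:
--         node = 0
--         for c in reversed(q):
--             nxt = children[node].get(c)
--             if nxt is None:
--                 children.append({})
--                 accept.append(False)
--                 nxt = len(children) - 1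
--                 children[node][c] = nxt
--             node = nxt
--         accept[node] = True
--     return children, accept
--
--
-- def parse_trading_pair(symbol: str) -> tuple[str, str]:
--     s = symbol.upper().replace("/", "").replace("-", "").replace("_", "")
--     children, accept = _build_trie(["USDT", "BUSD", "USDC", "TUSD", "BTC", "ETH", "BNB"])
--     # One backward scan through the trie; the deepest accepting node seen is the
--     # longest known quote suffix, which is A's precedence (4-char quotes first).
--     node, depth, best = 0, 0, None
--     for c in reversed(s):
--         nxt = children[node].get(c)
--         if nxt is None:
--             break
--         node = nxt
--         depth += 1
--         if accept[node]:
--             best = depth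
--     cut = best if best is not None else 4
--     return (s[:-cut], s[-cut:])
-- ===== Notes on version B (the rewrite author's own statement) =====
-- stated objective: alternative
-- what changed: A's per-quote endswith scan over the 7-quote list is replaced by building a trie of the reversed quote strings and making one backward character walk of the normalized symbol through it, taking the deepest accepting depth (longest match, which equals A's 4-before-3 precedence) as the quote length.
import Mathlib
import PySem

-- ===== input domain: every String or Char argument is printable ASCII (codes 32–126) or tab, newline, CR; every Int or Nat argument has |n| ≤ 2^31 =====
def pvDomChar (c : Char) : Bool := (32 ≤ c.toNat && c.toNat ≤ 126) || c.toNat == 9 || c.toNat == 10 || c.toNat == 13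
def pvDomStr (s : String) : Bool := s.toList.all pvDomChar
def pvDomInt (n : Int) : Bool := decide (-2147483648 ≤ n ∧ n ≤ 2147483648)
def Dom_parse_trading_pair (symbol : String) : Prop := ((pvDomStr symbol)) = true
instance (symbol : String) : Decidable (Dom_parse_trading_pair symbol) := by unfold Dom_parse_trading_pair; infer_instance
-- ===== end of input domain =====

-- B replaces A's per-quote endswith scan by one backward walk of the normalized symbol
-- through a trie of reversed quote strings (deepest accept = quote length); objective:
-- alternative algorithm/data structure, return value only (neither version has side effects).

-- ===== PORT A =====
-- the for-loop over quotes, with early return on the first matching suffix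
def pvA_loop (s : String) : List String → String × String
  | [] => (PySem.Str.slice s none (some (-4)), PySem.Str.slice s (some (-4)) none)
  | q :: rest =>
      if PySem.Str.endswith s q then
        (PySem.Str.slice s none (some (-(PySem.Str.len q : Int))), q)
      else pvA_loop s rest

def parse_trading_pair (symbol : String) : String × String :=
  let s := PySem.Str.replace (PySem.Str.replace (PySem.Str.replace
            (PySem.Str.upper symbol) "/" "") "-" "") "_" ""
  pvA_loop s ["USDT", "BUSD", "USDC", "TUSD", "BTC", "ETH", "BNB"]

-- ===== PORT B =====
-- _build_trie's inner loop body: one character of one quote, threading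
-- (children, accept) and the current node id
def pvTrieStep (st : (List (PySem.Dict Char Int) × List Bool) × Int) (c : Char) :
    (List (PySem.Dict Char Int) × List Bool) × Int :=
  let children := st.1.1
  let accept := st.1.2
  let node := st.2
  -- children[node] is always in range in B; pyGetD's default is a totality guard only
  match PySem.Dict.get? (PySem.List.pyGetD children node PySem.Dict.empty) c with
  | some nxt => ((children, accept), nxt)
  | none =>
      let children1 := children ++ [PySem.Dict.empty]
      let accept1 := accept ++ [false]
      let nxt : Int := (children1.length : Int) - 1
      let children2 := PySem.List.pySetD children1 node
        ((PySem.List.pyGetD children1 node PySem.Dict.empty).insert c nxt)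
      ((children2, accept1), nxt)

-- _build_trie: trie over the reversed quotes, as parallel arrays (children, accept)
def pvBuildTrie (quotes : List String) : List (PySem.Dict Char Int) × List Bool :=
  quotes.foldl
    (fun st q =>
      let r := q.toList.reverse.foldl pvTrieStep (st, (0 : Int))
      (r.1.1, PySem.List.pySetD r.1.2 r.2 true))
    ([PySem.Dict.empty], [false])

-- B's 'for c in reversed(s)' loop with break, threading (node, depth, best)
def pvWalk (children : List (PySem.Dict Char Int)) (accept : List Bool) :
    List Char → Int → Int → Option Int → Option Int
  | [], _, _, best => best
  | c :: rest, node, depth, best =>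
    match PySem.Dict.get? (PySem.List.pyGetD children node PySem.Dict.empty) c with
    | none => best
    | some nxt =>
        let depth' := depth + 1
        let best' := if PySem.List.pyGetD accept nxt false then some depth' else best
        pvWalk children accept rest nxt depth' best'

def parse_trading_pair_alt (symbol : String) : String × String :=
  let s := PySem.Str.replace (PySem.Str.replace (PySem.Str.replace
            (PySem.Str.upper symbol) "/" "") "-" "") "_" ""
  let t := pvBuildTrie ["USDT", "BUSD", "USDC", "TUSD", "BTC", "ETH", "BNB"]
  let best := pvWalk t.1 t.2 s.toList.reverse 0 0 none
  let cut : Int := best.getD 4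
  (PySem.Str.slice s none (some (-cut)), PySem.Str.slice s (some (-cut)) none)

-- ===== PRECONDITION & SPEC =====
def Spec_parse_trading_pair (symbol : String) (out : String × String) : Prop := out = parse_trading_pair_alt symbol
instance (symbol : String) (out : String × String) : Decidable (Spec_parse_trading_pair symbol out) := by unfold Spec_parse_trading_pair; infer_instance

-- ===== CLAIM (what is proved, stated in full; the proofs are below) =====
def Claim_equal_parse_trading_pair : Prop := ∀ (symbol : String), Dom_parse_trading_pair symbol → Spec_parse_trading_pair symbol (parse_trading_pair symbol)

-- ===== LEMMAS AND PROOFS =====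

-- the concrete trie B builds (checked below by pv_build_eval)
def pvCs : List (PySem.Dict Char Int) :=
  [⟨[('T', 1), ('D', 5), ('C', 9), ('H', 16), ('B', 19)]⟩, ⟨[('D', 2)]⟩, ⟨[('S', 3)]⟩,
   ⟨[('U', 4)]⟩, ⟨[]⟩, ⟨[('S', 6)]⟩, ⟨[('U', 7)]⟩, ⟨[('B', 8), ('T', 13)]⟩, ⟨[]⟩,
   ⟨[('D', 10), ('T', 14)]⟩, ⟨[('S', 11)]⟩, ⟨[('U', 12)]⟩, ⟨[]⟩, ⟨[]⟩, ⟨[('B', 15)]⟩,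
   ⟨[]⟩, ⟨[('T', 17)]⟩, ⟨[('E', 18)]⟩, ⟨[]⟩, ⟨[('N', 20)]⟩, ⟨[('B', 21)]⟩, ⟨[]⟩]

def pvAs : List Bool :=
  [false, false, false, false, true, false, false, false, true, false, false, false,
   true, true, false, true, false, false, true, false, false, true]

set_option maxRecDepth 4096 in
theorem pv_build_eval :
    pvBuildTrie ["USDT", "BUSD", "USDC", "TUSD", "BTC", "ETH", "BNB"] = (pvCs, pvAs) := by
  decide

-- leaf nodes (completed quotes) have no children: the walk stops there
theorem pv_dead (n : Int) (hn : n = 4 ∨ n = 8 ∨ n = 12 ∨ n = 13 ∨ n = 15 ∨ n = 18 ∨ n = 21)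
    (l : List Char) (depth : Int) (best : Option Int) :
    pvWalk pvCs pvAs l n depth best = best := by
  cases l with
  | nil => rfl
  | cons c rest =>
    rcases hn with h | h | h | h | h | h | h <;> subst h <;>
      simp [pvWalk, PySem.Dict.get?, pvCs, PySem.List.pyGetD]

theorem pv_step0 (c : Char) (rest : List Char) (depth : Int) (best : Option Int) :
    pvWalk pvCs pvAs (c :: rest) 0 depth best =
      (if c = 'T' then pvWalk pvCs pvAs rest 1 (depth + 1) best else if c = 'D' then pvWalk pvCs pvAs rest 5 (depth + 1) best else if c = 'C' then pvWalk pvCs pvAs rest 9 (depth + 1) best else if c = 'H' then pvWalk pvCs pvAs rest 16 (depth + 1) best else if c = 'B' then pvWalk pvCs pvAs rest 19 (depth + 1) best else best) := by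
  by_cases h0 : c = 'T'
  · subst h0; simp [pvWalk, PySem.Dict.get?, pvCs, pvAs, PySem.List.pyGetD]
  by_cases h1 : c = 'D'
  · subst h1; simp [pvWalk, PySem.Dict.get?, pvCs, pvAs, PySem.List.pyGetD]
  by_cases h2 : c = 'C'
  · subst h2; simp [pvWalk, PySem.Dict.get?, pvCs, pvAs, PySem.List.pyGetD]
  by_cases h3 : c = 'H'
  · subst h3; simp [pvWalk, PySem.Dict.get?, pvCs, pvAs, PySem.List.pyGetD]
  by_cases h4 : c = 'B'
  · subst h4; simp [pvWalk, PySem.Dict.get?, pvCs, pvAs, PySem.List.pyGetD]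
  · simp [pvWalk, PySem.Dict.get?, pvCs, PySem.List.pyGetD, beq_eq_false_iff_ne.mpr (Ne.symm h0), h0, beq_eq_false_iff_ne.mpr (Ne.symm h1), h1, beq_eq_false_iff_ne.mpr (Ne.symm h2), h2, beq_eq_false_iff_ne.mpr (Ne.symm h3), h3, beq_eq_false_iff_ne.mpr (Ne.symm h4), h4]

theorem pv_step1 (c : Char) (rest : List Char) (depth : Int) (best : Option Int) :
    pvWalk pvCs pvAs (c :: rest) 1 depth best =
      (if c = 'D' then pvWalk pvCs pvAs rest 2 (depth + 1) best else best) := by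
  by_cases h0 : c = 'D'
  · subst h0; simp [pvWalk, PySem.Dict.get?, pvCs, pvAs, PySem.List.pyGetD]
  · simp [pvWalk, PySem.Dict.get?, pvCs, PySem.List.pyGetD, beq_eq_false_iff_ne.mpr (Ne.symm h0), h0]

theorem pv_step2 (c : Char) (rest : List Char) (depth : Int) (best : Option Int) :
    pvWalk pvCs pvAs (c :: rest) 2 depth best =
      (if c = 'S' then pvWalk pvCs pvAs rest 3 (depth + 1) best else best) := by
  by_cases h0 : c = 'S'
  · subst h0; simp [pvWalk, PySem.Dict.get?, pvCs, pvAs, PySem.List.pyGetD]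
  · simp [pvWalk, PySem.Dict.get?, pvCs, PySem.List.pyGetD, beq_eq_false_iff_ne.mpr (Ne.symm h0), h0]

theorem pv_step3 (c : Char) (rest : List Char) (depth : Int) (best : Option Int) :
    pvWalk pvCs pvAs (c :: rest) 3 depth best =
      (if c = 'U' then pvWalk pvCs pvAs rest 4 (depth + 1) (some (depth + 1)) else best) := by
  by_cases h0 : c = 'U'
  · subst h0; simp [pvWalk, PySem.Dict.get?, pvCs, pvAs, PySem.List.pyGetD]
  · simp [pvWalk, PySem.Dict.get?, pvCs, PySem.List.pyGetD, beq_eq_false_iff_ne.mpr (Ne.symm h0), h0]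

theorem pv_step5 (c : Char) (rest : List Char) (depth : Int) (best : Option Int) :
    pvWalk pvCs pvAs (c :: rest) 5 depth best =
      (if c = 'S' then pvWalk pvCs pvAs rest 6 (depth + 1) best else best) := by
  by_cases h0 : c = 'S'
  · subst h0; simp [pvWalk, PySem.Dict.get?, pvCs, pvAs, PySem.List.pyGetD]
  · simp [pvWalk, PySem.Dict.get?, pvCs, PySem.List.pyGetD, beq_eq_false_iff_ne.mpr (Ne.symm h0), h0]

theorem pv_step6 (c : Char) (rest : List Char) (depth : Int) (best : Option Int) :
    pvWalk pvCs pvAs (c :: rest) 6 depth best =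
      (if c = 'U' then pvWalk pvCs pvAs rest 7 (depth + 1) best else best) := by
  by_cases h0 : c = 'U'
  · subst h0; simp [pvWalk, PySem.Dict.get?, pvCs, pvAs, PySem.List.pyGetD]
  · simp [pvWalk, PySem.Dict.get?, pvCs, PySem.List.pyGetD, beq_eq_false_iff_ne.mpr (Ne.symm h0), h0]

theorem pv_step7 (c : Char) (rest : List Char) (depth : Int) (best : Option Int) :
    pvWalk pvCs pvAs (c :: rest) 7 depth best =
      (if c = 'B' then pvWalk pvCs pvAs rest 8 (depth + 1) (some (depth + 1)) else if c = 'T' then pvWalk pvCs pvAs rest 13 (depth + 1) (some (depth + 1)) else best) := by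
  by_cases h0 : c = 'B'
  · subst h0; simp [pvWalk, PySem.Dict.get?, pvCs, pvAs, PySem.List.pyGetD]
  by_cases h1 : c = 'T'
  · subst h1; simp [pvWalk, PySem.Dict.get?, pvCs, pvAs, PySem.List.pyGetD]
  · simp [pvWalk, PySem.Dict.get?, pvCs, PySem.List.pyGetD, beq_eq_false_iff_ne.mpr (Ne.symm h0), h0, beq_eq_false_iff_ne.mpr (Ne.symm h1), h1]

theorem pv_step9 (c : Char) (rest : List Char) (depth : Int) (best : Option Int) :
    pvWalk pvCs pvAs (c :: rest) 9 depth best =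
      (if c = 'D' then pvWalk pvCs pvAs rest 10 (depth + 1) best else if c = 'T' then pvWalk pvCs pvAs rest 14 (depth + 1) best else best) := by
  by_cases h0 : c = 'D'
  · subst h0; simp [pvWalk, PySem.Dict.get?, pvCs, pvAs, PySem.List.pyGetD]
  by_cases h1 : c = 'T'
  · subst h1; simp [pvWalk, PySem.Dict.get?, pvCs, pvAs, PySem.List.pyGetD]
  · simp [pvWalk, PySem.Dict.get?, pvCs, PySem.List.pyGetD, beq_eq_false_iff_ne.mpr (Ne.symm h0), h0, beq_eq_false_iff_ne.mpr (Ne.symm h1), h1]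

theorem pv_step10 (c : Char) (rest : List Char) (depth : Int) (best : Option Int) :
    pvWalk pvCs pvAs (c :: rest) 10 depth best =
      (if c = 'S' then pvWalk pvCs pvAs rest 11 (depth + 1) best else best) := by
  by_cases h0 : c = 'S'
  · subst h0; simp [pvWalk, PySem.Dict.get?, pvCs, pvAs, PySem.List.pyGetD]
  · simp [pvWalk, PySem.Dict.get?, pvCs, PySem.List.pyGetD, beq_eq_false_iff_ne.mpr (Ne.symm h0), h0]

theorem pv_step11 (c : Char) (rest : List Char) (depth : Int) (best : Option Int) :
    pvWalk pvCs pvAs (c :: rest) 11 depth best =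
      (if c = 'U' then pvWalk pvCs pvAs rest 12 (depth + 1) (some (depth + 1)) else best) := by
  by_cases h0 : c = 'U'
  · subst h0; simp [pvWalk, PySem.Dict.get?, pvCs, pvAs, PySem.List.pyGetD]
  · simp [pvWalk, PySem.Dict.get?, pvCs, PySem.List.pyGetD, beq_eq_false_iff_ne.mpr (Ne.symm h0), h0]

theorem pv_step14 (c : Char) (rest : List Char) (depth : Int) (best : Option Int) :
    pvWalk pvCs pvAs (c :: rest) 14 depth best =
      (if c = 'B' then pvWalk pvCs pvAs rest 15 (depth + 1) (some (depth + 1)) else best) := by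
  by_cases h0 : c = 'B'
  · subst h0; simp [pvWalk, PySem.Dict.get?, pvCs, pvAs, PySem.List.pyGetD]
  · simp [pvWalk, PySem.Dict.get?, pvCs, PySem.List.pyGetD, beq_eq_false_iff_ne.mpr (Ne.symm h0), h0]

theorem pv_step16 (c : Char) (rest : List Char) (depth : Int) (best : Option Int) :
    pvWalk pvCs pvAs (c :: rest) 16 depth best =
      (if c = 'T' then pvWalk pvCs pvAs rest 17 (depth + 1) best else best) := by
  by_cases h0 : c = 'T'
  · subst h0; simp [pvWalk, PySem.Dict.get?, pvCs, pvAs, PySem.List.pyGetD]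
  · simp [pvWalk, PySem.Dict.get?, pvCs, PySem.List.pyGetD, beq_eq_false_iff_ne.mpr (Ne.symm h0), h0]

theorem pv_step17 (c : Char) (rest : List Char) (depth : Int) (best : Option Int) :
    pvWalk pvCs pvAs (c :: rest) 17 depth best =
      (if c = 'E' then pvWalk pvCs pvAs rest 18 (depth + 1) (some (depth + 1)) else best) := by
  by_cases h0 : c = 'E'
  · subst h0; simp [pvWalk, PySem.Dict.get?, pvCs, pvAs, PySem.List.pyGetD]
  · simp [pvWalk, PySem.Dict.get?, pvCs, PySem.List.pyGetD, beq_eq_false_iff_ne.mpr (Ne.symm h0), h0]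

theorem pv_step19 (c : Char) (rest : List Char) (depth : Int) (best : Option Int) :
    pvWalk pvCs pvAs (c :: rest) 19 depth best =
      (if c = 'N' then pvWalk pvCs pvAs rest 20 (depth + 1) best else best) := by
  by_cases h0 : c = 'N'
  · subst h0; simp [pvWalk, PySem.Dict.get?, pvCs, pvAs, PySem.List.pyGetD]
  · simp [pvWalk, PySem.Dict.get?, pvCs, PySem.List.pyGetD, beq_eq_false_iff_ne.mpr (Ne.symm h0), h0]

theorem pv_step20 (c : Char) (rest : List Char) (depth : Int) (best : Option Int) :
    pvWalk pvCs pvAs (c :: rest) 20 depth best =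
      (if c = 'B' then pvWalk pvCs pvAs rest 21 (depth + 1) (some (depth + 1)) else best) := by
  by_cases h0 : c = 'B'
  · subst h0; simp [pvWalk, PySem.Dict.get?, pvCs, pvAs, PySem.List.pyGetD]
  · simp [pvWalk, PySem.Dict.get?, pvCs, PySem.List.pyGetD, beq_eq_false_iff_ne.mpr (Ne.symm h0), h0]

theorem pv_walk_nil (cs : List (PySem.Dict Char Int)) (as_ : List Bool)
    (n d : Int) (b : Option Int) : pvWalk cs as_ [] n d b = b := rfl

-- one backward step through the trie per prefix of the reversed symbol:
-- the walk from the root computes the longest reversed-quote prefix of l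
set_option maxHeartbeats 2000000 in
theorem pv_walk_spec (l : List Char) :
    pvWalk pvCs pvAs l 0 0 none =
      (if l.take 4 = ['T','D','S','U'] ∨ l.take 4 = ['D','S','U','B'] ∨
          l.take 4 = ['C','D','S','U'] ∨ l.take 4 = ['D','S','U','T'] then some 4
       else if l.take 3 = ['C','T','B'] ∨ l.take 3 = ['H','T','E'] ∨
          l.take 3 = ['B','N','B'] then some 3
       else none) := by
  rcases l with _ | ⟨a, _ | ⟨b, _ | ⟨c, _ | ⟨d, rest⟩⟩⟩⟩ <;>
    simp only [pv_walk_nil, pv_step0, pv_step1, pv_step2, pv_step3, pv_step5, pv_step6,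
      pv_step7, pv_step9, pv_step10, pv_step11, pv_step14, pv_step16, pv_step17,
      pv_step19, pv_step20,
      pv_dead 4 (by norm_num), pv_dead 8 (by norm_num), pv_dead 12 (by norm_num),
      pv_dead 13 (by norm_num), pv_dead 15 (by norm_num), pv_dead 18 (by norm_num),
      pv_dead 21 (by norm_num), List.take] <;>
    split_ifs <;> simp_all

-- s ends with the k-char quote q iff the reversed symbol starts with q reversed
theorem pv_sfx (s : String) (k : Nat) (hk : 0 < k) (q : String) (hq : q.toList.length = k) :
    (PySem.Str.slice s (some (-(k : Int))) none = q) ↔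
      s.toList.reverse.take k = q.toList.reverse := by
  have hsl : (PySem.Str.slice s (some (-(k : Int))) none).toList
      = s.toList.drop (s.toList.length - k) := by
    simp [PySem.List.slice_from_neg_natCast s.toList k hk]
  have key : s.toList.reverse.take k = (s.toList.drop (s.toList.length - k)).reverse := by
    rw [List.reverse_drop]
    rcases Nat.le_total k s.toList.length with h | h
    · congr 1; omega
    · have h0 : s.toList.length - k = 0 := by omega
      rw [h0, Nat.sub_zero, List.take_of_length_le (by simpa using h),
        List.take_of_length_le (by simp)]
  rw [← String.toList_inj, hsl, key]
  constructor
  · intro h; rw [h]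
  · intro h; exact List.reverse_injective h

-- A's scan characterized: first matching quote, 4-char quotes before 3-char ones
set_option maxHeartbeats 1000000 in
theorem pv_main (s : String) :
    pvA_loop s ["USDT", "BUSD", "USDC", "TUSD", "BTC", "ETH", "BNB"]
      = (if PySem.Str.slice s (some (-4)) none = "USDT" ∨ PySem.Str.slice s (some (-4)) none = "BUSD" ∨
            PySem.Str.slice s (some (-4)) none = "USDC" ∨ PySem.Str.slice s (some (-4)) none = "TUSD" then
          (PySem.Str.slice s none (some (-4)), PySem.Str.slice s (some (-4)) none)
        else if PySem.Str.slice s (some (-3)) none = "BTC" ∨ PySem.Str.slice s (some (-3)) none = "ETH" ∨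
            PySem.Str.slice s (some (-3)) none = "BNB" then
          (PySem.Str.slice s none (some (-3)), PySem.Str.slice s (some (-3)) none)
        else
          (PySem.Str.slice s none (some (-4)), PySem.Str.slice s (some (-4)) none)) := by
  have hsl4 : (PySem.Str.slice s (some (-4)) none).toList = s.toList.drop (s.toList.length - 4) := by
    simp [PySem.List.slice_from_neg_ofNat _ 4 (by omega)]
  have hsl3 : (PySem.Str.slice s (some (-3)) none).toList = s.toList.drop (s.toList.length - 3) := by
    simp [PySem.List.slice_from_neg_ofNat _ 3 (by omega)]
  have e4 : ∀ q : String, q.toList.length = 4 →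
      ((PySem.Str.endswith s q = true) ↔ PySem.Str.slice s (some (-4)) none = q) := by
    intro q hq
    rw [← String.toList_inj, hsl4]
    simp only [PySem.Str.endswith_eq, PySem.Chars.endswith_iff]
    rw [List.suffix_iff_eq_drop, hq]
    exact eq_comm
  have e3 : ∀ q : String, q.toList.length = 3 →
      ((PySem.Str.endswith s q = true) ↔ PySem.Str.slice s (some (-3)) none = q) := by
    intro q hq
    rw [← String.toList_inj, hsl3]
    simp only [PySem.Str.endswith_eq, PySem.Chars.endswith_iff]
    rw [List.suffix_iff_eq_drop, hq]
    exact eq_comm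
  simp only [pvA_loop,
    show (PySem.Str.len "USDT") = 4 from by decide,
    show (PySem.Str.len "BUSD") = 4 from by decide,
    show (PySem.Str.len "USDC") = 4 from by decide,
    show (PySem.Str.len "TUSD") = 4 from by decide,
    show (PySem.Str.len "BTC") = 3 from by decide,
    show (PySem.Str.len "ETH") = 3 from by decide,
    show (PySem.Str.len "BNB") = 3 from by decide,
    e4 "USDT" (by decide), e4 "BUSD" (by decide), e4 "USDC" (by decide),
    e4 "TUSD" (by decide), e3 "BTC" (by decide), e3 "ETH" (by decide),
    e3 "BNB" (by decide)]
  by_cases h1 : PySem.Str.slice s (some (-4)) none = "USDT" <;>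
  by_cases h2 : PySem.Str.slice s (some (-4)) none = "BUSD" <;>
  by_cases h3 : PySem.Str.slice s (some (-4)) none = "USDC" <;>
  by_cases h4 : PySem.Str.slice s (some (-4)) none = "TUSD" <;>
  by_cases h5 : PySem.Str.slice s (some (-3)) none = "BTC" <;>
  by_cases h6 : PySem.Str.slice s (some (-3)) none = "ETH" <;>
  by_cases h7 : PySem.Str.slice s (some (-3)) none = "BNB" <;>
  simp_all

-- the walk's take-conditions are exactly A's suffix conditions
theorem pv_cUSDT (s : String) : s.toList.reverse.take 4 = ['T','D','S','U'] ↔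
    PySem.Str.slice s (some (-4)) none = "USDT" := by
  have h := pv_sfx s 4 (by norm_num) "USDT" (by decide)
  norm_num at h
  rw [show ("USDT".toList.reverse) = ['T','D','S','U'] from by decide] at h
  exact h.symm

theorem pv_cBUSD (s : String) : s.toList.reverse.take 4 = ['D','S','U','B'] ↔
    PySem.Str.slice s (some (-4)) none = "BUSD" := by
  have h := pv_sfx s 4 (by norm_num) "BUSD" (by decide)
  norm_num at h
  rw [show ("BUSD".toList.reverse) = ['D','S','U','B'] from by decide] at h
  exact h.symm

theorem pv_cUSDC (s : String) : s.toList.reverse.take 4 = ['C','D','S','U'] ↔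
    PySem.Str.slice s (some (-4)) none = "USDC" := by
  have h := pv_sfx s 4 (by norm_num) "USDC" (by decide)
  norm_num at h
  rw [show ("USDC".toList.reverse) = ['C','D','S','U'] from by decide] at h
  exact h.symm

theorem pv_cTUSD (s : String) : s.toList.reverse.take 4 = ['D','S','U','T'] ↔
    PySem.Str.slice s (some (-4)) none = "TUSD" := by
  have h := pv_sfx s 4 (by norm_num) "TUSD" (by decide)
  norm_num at h
  rw [show ("TUSD".toList.reverse) = ['D','S','U','T'] from by decide] at h
  exact h.symm

theorem pv_cBTC (s : String) : s.toList.reverse.take 3 = ['C','T','B'] ↔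
    PySem.Str.slice s (some (-3)) none = "BTC" := by
  have h := pv_sfx s 3 (by norm_num) "BTC" (by decide)
  norm_num at h
  rw [show ("BTC".toList.reverse) = ['C','T','B'] from by decide] at h
  exact h.symm

theorem pv_cETH (s : String) : s.toList.reverse.take 3 = ['H','T','E'] ↔
    PySem.Str.slice s (some (-3)) none = "ETH" := by
  have h := pv_sfx s 3 (by norm_num) "ETH" (by decide)
  norm_num at h
  rw [show ("ETH".toList.reverse) = ['H','T','E'] from by decide] at h
  exact h.symm

theorem pv_cBNB (s : String) : s.toList.reverse.take 3 = ['B','N','B'] ↔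
    PySem.Str.slice s (some (-3)) none = "BNB" := by
  have h := pv_sfx s 3 (by norm_num) "BNB" (by decide)
  norm_num at h
  rw [show ("BNB".toList.reverse) = ['B','N','B'] from by decide] at h
  exact h.symm

-- the two programs agree on every (already normalized) symbol
theorem pv_equal (s : String) :
    pvA_loop s ["USDT", "BUSD", "USDC", "TUSD", "BTC", "ETH", "BNB"]
      = (let t := pvBuildTrie ["USDT", "BUSD", "USDC", "TUSD", "BTC", "ETH", "BNB"]
         let best := pvWalk t.1 t.2 s.toList.reverse 0 0 none
         let cut : Int := best.getD 4
         (PySem.Str.slice s none (some (-cut)), PySem.Str.slice s (some (-cut)) none)) := by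
  rw [pv_main]
  simp only [pv_build_eval, pv_walk_spec, pv_cUSDT, pv_cBUSD, pv_cUSDC, pv_cTUSD,
    pv_cBTC, pv_cETH, pv_cBNB]
  split_ifs <;> simp

-- ===== VERDICT (by name: the statement is the Claim_ definition above) =====
theorem parse_trading_pair_spec : Claim_equal_parse_trading_pair := by
  intro symbol _
  unfold Spec_parse_trading_pair parse_trading_pair parse_trading_pair_alt
  exact pv_equal _
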